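-- pv_equiv track=rewrite | github.com/AV2884/AI | NLP/logisticRegression/nn.py | build_freq_table
-- ===== SOURCE A (Python) =====
-- from collections import defaultdict
--
-- def build_freq_table(tweets, labels):
--     freq_table = defaultdict(lambda: [0, 0])
--
--     for tweet, label in zip(tweets, labels):
--         for word in tweet:
--             if label == 1:
--                 freq_table[word][1] += 1  # Positive count
--             else:
--                 freq_table[word][0] += 1  # negitive count
--
--     return freq_table
-- ===== SOURCE B (Python) =====
-- from collections import defaultdict, Counter
--
--
-- def build_freq_table(tweets, labels):
--     pairs = list(zip(tweets, labels))
--     pos = Counter(w for t, l in pairs if l == 1 for w in t)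
--     neg = Counter(w for t, l in pairs if l != 1 for w in t)
--     words = dict.fromkeys(w for t, _ in pairs for w in t)
--     table = defaultdict(lambda: [0, 0])
--     for w in words:
--         table[w] = [neg[w], pos[w]]
--     return table
-- ===== Notes on version B (the rewrite author's own statement) =====
-- stated objective: alternative
-- what changed: A builds the table in one pass that mutates per-word [neg,pos] cells in a defaultdict; B instead makes separate counting passes (a positive and a negative Counter), collects the words in first-occurrence order with dict.fromkeys, and assembles each entry as [neg[w], pos[w]] from the two Counters.
import Mathlib
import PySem

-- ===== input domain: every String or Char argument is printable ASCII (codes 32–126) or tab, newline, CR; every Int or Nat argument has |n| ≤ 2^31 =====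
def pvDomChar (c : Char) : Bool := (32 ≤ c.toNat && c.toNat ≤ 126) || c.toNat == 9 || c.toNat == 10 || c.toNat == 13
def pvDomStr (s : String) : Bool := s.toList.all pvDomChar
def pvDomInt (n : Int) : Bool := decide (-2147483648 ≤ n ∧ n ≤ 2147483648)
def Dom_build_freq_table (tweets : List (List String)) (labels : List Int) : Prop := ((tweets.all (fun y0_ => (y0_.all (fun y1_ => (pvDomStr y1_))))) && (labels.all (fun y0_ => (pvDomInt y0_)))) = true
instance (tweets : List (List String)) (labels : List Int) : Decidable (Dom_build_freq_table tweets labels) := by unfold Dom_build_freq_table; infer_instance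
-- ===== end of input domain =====

-- B replaces A's single mutating pass by two Counter passes plus an assembly over the
-- first-occurrence word order (objective: alternative decomposition, same cost).

-- ===== PORT A =====
-- one defaultdict pass; freq_table[word][i] += 1 is Dict.modify with default [0,0]
def build_freq_table (tweets : List (List String)) (labels : List Int) : List (String × List Int) :=
  let freq_table : PySem.Dict String (List Int) :=
    (tweets.zip labels).foldl
      (fun d p =>
        p.1.foldl
          (fun d w =>
            if p.2 == 1 then
              d.modify w [0, 0] (fun v => [PySem.List.pyGetD v 0 0, PySem.List.pyGetD v 1 0 + 1])
            else
              d.modify w [0, 0] (fun v => [PySem.List.pyGetD v 0 0 + 1, PySem.List.pyGetD v 1 0]))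
          d)
      PySem.Dict.empty
  freq_table.items

-- ===== PORT B =====
def build_freq_table_alt (tweets : List (List String)) (labels : List Int) : List (String × List Int) :=
  let pairs := tweets.zip labels
  let pos := PySem.Dict.counter ((pairs.filter (fun p => p.2 == 1)).flatMap (fun p => p.1))
  let neg := PySem.Dict.counter ((pairs.filter (fun p => !(p.2 == 1))).flatMap (fun p => p.1))
  let words := PySem.List.dedup (pairs.flatMap (fun p => p.1))
  let table : PySem.Dict String (List Int) :=
    words.foldl (fun d w => d.insert w [neg.getD w 0, pos.getD w 0]) PySem.Dict.empty
  table.items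

-- ===== PRECONDITION & SPEC =====
def Spec_build_freq_table (tweets : List (List String)) (labels : List Int) (out : List (String × List Int)) : Prop := out = build_freq_table_alt tweets labels
instance (tweets : List (List String)) (labels : List Int) (out : List (String × List Int)) : Decidable (Spec_build_freq_table tweets labels out) := by unfold Spec_build_freq_table; infer_instance

-- ===== CLAIM (what is proved, stated in full; the proofs are below) =====
def Claim_equal_build_freq_table : Prop := ∀ (tweets : List (List String)) (labels : List Int), Dom_build_freq_table tweets labels → Spec_build_freq_table tweets labels (build_freq_table tweets labels)

-- ===== LEMMAS AND PROOFS =====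

-- the zipped (word, label) stream A iterates over, flattened
def pvWL (tweets : List (List String)) (labels : List Int) : List (String × Int) :=
  (tweets.zip labels).flatMap (fun p => p.1.map (fun w => (w, p.2)))

-- A's loop body on one (word, label)
def pvStep (d : PySem.Dict String (List Int)) (q : String × Int) : PySem.Dict String (List Int) :=
  d.modify q.1 [0, 0] (fun v =>
    if q.2 == 1 then [PySem.List.pyGetD v 0 0, PySem.List.pyGetD v 1 0 + 1]
    else [PySem.List.pyGetD v 0 0 + 1, PySem.List.pyGetD v 1 0])

def pvNegW (ws : List (String × Int)) : List String := (ws.filter (fun q => !(q.2 == 1))).map (·.1)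
def pvPosW (ws : List (String × Int)) : List String := (ws.filter (fun q => q.2 == 1)).map (·.1)

lemma pvFoldA (l : List (List String × Int)) (d : PySem.Dict String (List Int)) :
    l.foldl
      (fun d p =>
        p.1.foldl
          (fun d w =>
            if p.2 == 1 then
              d.modify w [0, 0] (fun v => [PySem.List.pyGetD v 0 0, PySem.List.pyGetD v 1 0 + 1])
            else
              d.modify w [0, 0] (fun v => [PySem.List.pyGetD v 0 0 + 1, PySem.List.pyGetD v 1 0]))
          d)
      d
    = (l.flatMap (fun p => p.1.map (fun w => (w, p.2)))).foldl pvStep d := by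
  induction l generalizing d with
  | nil => rfl
  | cons p t ih =>
    simp only [List.flatMap_cons, List.foldl_append, List.foldl_cons, List.foldl_map, ih]
    congr 1
    cases h : p.2 == 1 <;> simp [pvStep, h]

lemma pvStep_shape (d : PySem.Dict String (List Int)) (q : String × Int)
    (h : ∀ w, ∃ a b, d.getD w [0, 0] = [a, b]) :
    ∀ w, ∃ a b, (pvStep d q).getD w [0, 0] = [a, b] := by
  intro w
  rw [pvStep, PySem.Dict.getD_modify]
  split_ifs with hw hq
  · exact ⟨_, _, rfl⟩
  · exact ⟨_, _, rfl⟩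
  · exact h w

lemma pvGetD (ws : List (String × Int)) (d : PySem.Dict String (List Int))
    (h : ∀ w, ∃ a b, d.getD w [0, 0] = [a, b]) (w : String) :
    (ws.foldl pvStep d).getD w [0, 0] =
      [PySem.List.pyGetD (d.getD w [0, 0]) 0 0 + ((pvNegW ws).count w : Int),
       PySem.List.pyGetD (d.getD w [0, 0]) 1 0 + ((pvPosW ws).count w : Int)] := by
  induction ws generalizing d with
  | nil =>
    obtain ⟨a, b, hab⟩ := h w
    simp [pvNegW, pvPosW, hab, PySem.List.pyGetD]
  | cons q t ih =>
    rw [List.foldl_cons, ih (pvStep d q) (pvStep_shape d q h)]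
    obtain ⟨a, b, hab⟩ := h w
    have hmod : (pvStep d q).getD w [0, 0] =
        if w = q.1 then
          (if q.2 == 1 then [PySem.List.pyGetD (d.getD q.1 [0, 0]) 0 0,
                             PySem.List.pyGetD (d.getD q.1 [0, 0]) 1 0 + 1]
           else [PySem.List.pyGetD (d.getD q.1 [0, 0]) 0 0 + 1,
                 PySem.List.pyGetD (d.getD q.1 [0, 0]) 1 0])
        else d.getD w [0, 0] := by
      rw [pvStep, PySem.Dict.getD_modify]
    by_cases hw : w = q.1
    · subst hw
      cases hq : q.2 == 1 <;>
        simp [hmod, hq, pvNegW, pvPosW, hab, PySem.List.pyGetD] <;> ring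
    · cases hq : q.2 == 1 <;>
        simp [hmod, hw, hq, pvNegW, pvPosW, Ne.symm hw]

lemma pvWords (l : List (List String × Int)) :
    (l.flatMap (fun p => p.1.map (fun w => (w, p.2)))).map (·.1) = l.flatMap (fun p => p.1) := by
  simp [List.map_flatMap, List.map_map, Function.comp_def]

lemma pvNegW_eq (l : List (List String × Int)) :
    pvNegW (l.flatMap (fun p => p.1.map (fun w => (w, p.2))))
      = (l.filter (fun p => !(p.2 == 1))).flatMap (fun p => p.1) := by
  induction l with
  | nil => rfl
  | cons p t ih =>
    simp only [List.flatMap_cons, pvNegW, List.filter_append, List.map_append, List.filter_map] at *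
    rw [ih]
    cases h : p.2 == 1 <;>
      simp [h, Function.comp_def, List.flatMap_cons]

lemma pvPosW_eq (l : List (List String × Int)) :
    pvPosW (l.flatMap (fun p => p.1.map (fun w => (w, p.2))))
      = (l.filter (fun p => p.2 == 1)).flatMap (fun p => p.1) := by
  induction l with
  | nil => rfl
  | cons p t ih =>
    simp only [List.flatMap_cons, pvPosW, List.filter_append, List.map_append, List.filter_map] at *
    rw [ih]
    cases h : p.2 == 1 <;>
      simp [h, Function.comp_def, List.flatMap_cons]

-- ===== VERDICT (by name: the statement is the Claim_ definition above) =====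
theorem build_freq_table_spec : Claim_equal_build_freq_table := by
  intro tweets labels _
  unfold Spec_build_freq_table build_freq_table build_freq_table_alt
  rw [pvFoldA]
  set l := tweets.zip labels with hl
  set ws := l.flatMap (fun p => p.1.map (fun w => (w, p.2))) with hws
  -- A side: items via keys + getD
  have hkeys : (ws.foldl pvStep PySem.Dict.empty).keys = PySem.Set.ofList (ws.map (·.1)) := by
    have hk := PySem.Dict.keys_foldl_modify_key ws (fun q => q.1) ([0, 0] : List Int)
      (fun _ q => fun (v : List Int) =>
        if q.2 == 1 then [PySem.List.pyGetD v 0 0, PySem.List.pyGetD v 1 0 + 1]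
        else [PySem.List.pyGetD v 0 0 + 1, PySem.List.pyGetD v 1 0])
      PySem.Dict.empty
    exact hk
  have hnodup : (ws.foldl pvStep PySem.Dict.empty).keys.Nodup := by
    exact PySem.Dict.nodup_keys_foldl_modify_key ws (fun q => q.1) ([0, 0] : List Int)
      (fun _ q => fun (v : List Int) =>
        if q.2 == 1 then [PySem.List.pyGetD v 0 0, PySem.List.pyGetD v 1 0 + 1]
        else [PySem.List.pyGetD v 0 0 + 1, PySem.List.pyGetD v 1 0])
      PySem.Dict.empty (by simp)
  have hempty : ∀ w, ∃ a b, (PySem.Dict.empty : PySem.Dict String (List Int)).getD w [0, 0] = [a, b] :=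
    fun w => ⟨0, 0, by simp⟩
  rw [PySem.Dict.items_eq_map_keys _ hnodup [0, 0], hkeys]
  -- B side: items of the fresh-key insert loop
  rw [PySem.Dict.items_foldl_insert_fresh (PySem.List.dedup (l.flatMap (fun p => p.1)))
        (fun w => w) _ PySem.Dict.empty (fun a _ => by simp)
        (by simp [PySem.List.dedup_eq_ofList, PySem.Set.nodup_ofList])]
  rw [show (PySem.Dict.empty : PySem.Dict String (List Int)).items = [] from rfl, List.nil_append]
  rw [PySem.List.dedup_eq_ofList, ← pvWords l, ← hws]
  have hns : pvNegW ws = (l.filter (fun p => !(p.2 == 1))).flatMap (fun p => p.1) := by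
    rw [hws]; exact pvNegW_eq l
  have hps : pvPosW ws = (l.filter (fun p => p.2 == 1)).flatMap (fun p => p.1) := by
    rw [hws]; exact pvPosW_eq l
  apply List.map_congr_left
  intro w _
  rw [pvGetD ws PySem.Dict.empty hempty w]
  simp [PySem.Dict.getD_counter, PySem.List.pyGetD, hns, hps]
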